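-- pv_equiv track=rewrite | github.com/voldeq/lucidscan | src/lucidshark/plugins/test_runners/ctest.py | _extract_short_message
-- ===== SOURCE A (Python) =====
-- def _extract_short_message(output: str) -> str:
--     """Extract a short failure message from test output.
--
--     Args:
--         output: Test output lines.
--
--     Returns:
--         Short message string.
--     """
--     if not output:
--         return "Test failed"
--
--     for line in output.splitlines():
--         stripped = line.strip()
--         # Look for assertion failures (Google Test, Catch2 patterns)
--         if any(
--             kw in stripped
--             for kw in [
--                 "FAILED",
--                 "REQUIRE(",
--                 "CHECK(",
--                 "EXPECT_",
--                 "ASSERT_",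
--                 "Expected:",
--                 "Actual:",
--                 "error:",
--             ]
--         ):
--             cleaned = stripped.replace("\n", " ").strip()
--             if len(cleaned) > 5:
--                 return cleaned[:100]
--
--     # Fallback: first non-empty line
--     for line in output.splitlines():
--         stripped = line.strip()
--         if stripped and not stripped.startswith("---"):
--             return stripped[:100]
--
--     return "Test failed"
-- ===== SOURCE B (Python) =====
-- _KEYWORDS = [
--     "FAILED",
--     "REQUIRE(",
--     "CHECK(",
--     "EXPECT_",
--     "ASSERT_",
--     "Expected:",
--     "Actual:",
--     "error:",
-- ]
--
--
-- def _extract_short_message(output: str) -> str: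
--     """Single pass: return the first long-enough keyword line immediately,
--     remembering the first plain non-empty line as a fallback."""
--     if not output:
--         return "Test failed"
--
--     fallback = None
--     for line in output.splitlines():
--         stripped = line.strip()
--         if len(stripped) > 5 and any(kw in stripped for kw in _KEYWORDS):
--             return stripped[:100]
--         if fallback is None and stripped and not stripped.startswith("---"):
--             fallback = stripped[:100]
--
--     return fallback if fallback is not None else "Test failed"
-- ===== Notes on version B (the rewrite author's own statement) =====
-- stated objective: alternative
-- what changed: A scans the split lines twice (keyword pass, then fallback pass); B makes a single pass that returns a long-enough keyword line immediately while remembering the first plain non-empty line as a fallback.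
import Mathlib
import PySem

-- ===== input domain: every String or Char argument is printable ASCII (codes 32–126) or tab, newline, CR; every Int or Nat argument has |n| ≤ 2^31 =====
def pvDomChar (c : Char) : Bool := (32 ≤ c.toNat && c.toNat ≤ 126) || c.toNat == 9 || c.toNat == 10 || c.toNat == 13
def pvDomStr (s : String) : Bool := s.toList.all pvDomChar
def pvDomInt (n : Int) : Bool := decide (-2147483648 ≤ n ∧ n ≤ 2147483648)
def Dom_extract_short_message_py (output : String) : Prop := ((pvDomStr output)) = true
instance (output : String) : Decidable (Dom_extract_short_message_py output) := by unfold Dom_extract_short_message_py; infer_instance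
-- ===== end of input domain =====

-- B makes one pass over the lines instead of A's two scans (keyword line returned
-- immediately, first plain non-empty line remembered as fallback); objective: alternative.

-- ===== PORT A =====
def aKeywords : List String :=
  ["FAILED", "REQUIRE(", "CHECK(", "EXPECT_", "ASSERT_", "Expected:", "Actual:", "error:"]

-- first for-loop of A: first keyword line whose cleaned form is longer than 5
def aLoop1 : List String → Option String
  | [] => none
  | line :: rest =>
    let stripped := PySem.Str.strip line
    if aKeywords.any (fun kw => PySem.Str.isIn kw stripped) then
      let cleaned := PySem.Str.strip (PySem.Str.replace stripped "\n" " ")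
      if 5 < PySem.Str.len cleaned then some (PySem.Str.slice cleaned none (some 100))
      else aLoop1 rest
    else aLoop1 rest

-- second for-loop of A: first non-empty line not starting with "---"
def aLoop2 : List String → Option String
  | [] => none
  | line :: rest =>
    let stripped := PySem.Str.strip line
    if PySem.Str.len stripped ≠ 0 && !PySem.Str.startswith stripped "---" then
      some (PySem.Str.slice stripped none (some 100))
    else aLoop2 rest

def extract_short_message_py (output : String) : String :=
  if PySem.Str.len output = 0 then "Test failed"
  else
    match aLoop1 (PySem.Str.splitlines output) with
    | some r => r
    | none => (aLoop2 (PySem.Str.splitlines output)).getD "Test failed"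

-- ===== PORT B =====
def bKeywords : List String :=
  ["FAILED", "REQUIRE(", "CHECK(", "EXPECT_", "ASSERT_", "Expected:", "Actual:", "error:"]

-- B's single pass: fb carries the recorded fallback, keyword hit returns at once
def bLoop : List String → Option String → String
  | [], fb => fb.getD "Test failed"
  | line :: rest, fb =>
    let stripped := PySem.Str.strip line
    if 5 < PySem.Str.len stripped && bKeywords.any (fun kw => PySem.Str.isIn kw stripped) then
      PySem.Str.slice stripped none (some 100)
    else
      bLoop rest
        (if fb.isNone && PySem.Str.len stripped ≠ 0 && !PySem.Str.startswith stripped "---" then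
          some (PySem.Str.slice stripped none (some 100))
        else fb)

def extract_short_message_py_alt (output : String) : String :=
  if PySem.Str.len output = 0 then "Test failed"
  else bLoop (PySem.Str.splitlines output) none

-- ===== PRECONDITION & SPEC =====
def Spec_extract_short_message_py (output : String) (out : String) : Prop := out = extract_short_message_py_alt output
instance (output : String) (out : String) : Decidable (Spec_extract_short_message_py output out) := by unfold Spec_extract_short_message_py; infer_instance

-- ===== CLAIM (what is proved, stated in full; the proofs are below) =====
def Claim_equal_extract_short_message_py : Prop := ∀ (output : String), Dom_extract_short_message_py output → Spec_extract_short_message_py output (extract_short_message_py output)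

-- ===== LEMMAS AND PROOFS =====

-- replace.go walks the list unchanged when the pattern never matches
theorem replace_go_no_newline (fuel : Nat) (l acc : List Char) (h : '\n' ∉ l) :
    PySem.Chars.replace.go ['\n'] [' '] fuel l acc = acc.reverse ++ l := by
  induction fuel generalizing l acc with
  | zero => simp [PySem.Chars.replace.go]
  | succ n ih =>
    cases l with
    | nil => simp [PySem.Chars.replace.go]
    | cons c t =>
      have hc : c ≠ '\n' := fun hc => h (hc ▸ List.mem_cons_self)
      have hp : List.isPrefixOf ['\n'] (c :: t) = false := by
        simp [List.isPrefixOf]; exact fun hcn => absurd hcn.symm hc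
      rw [PySem.Chars.replace.go, hp]
      simp only [Bool.false_eq_true, if_false]
      rw [ih t (c :: acc) (fun ht => h (List.mem_cons_of_mem _ ht))]
      simp

theorem replace_no_newline (cs : List Char) (h : '\n' ∉ cs) :
    PySem.Chars.replace cs ['\n'] [' '] = cs := by
  rw [PySem.Chars.replace]
  simp only [List.isEmpty_cons, if_false, Bool.false_eq_true]
  rw [replace_go_no_newline cs.length cs [] h]; simp

theorem rstrip_prefix (cs : List Char) : PySem.Chars.rstrip cs <+: cs := by
  rw [PySem.Chars.rstrip]
  have := (List.dropWhile_suffix (l := cs.reverse) PySem.Chars.isspace).reverse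
  simpa using this

theorem lstrip_of_lstrip_eq {t : List Char} (ht : PySem.Chars.lstrip t = t) :
    PySem.Chars.lstrip (PySem.Chars.rstrip t) = PySem.Chars.rstrip t := by
  rw [PySem.Chars.lstrip] at ht ⊢
  rcases List.dropWhile_eq_self_iff.mp ht with h0
  rcases hu : PySem.Chars.rstrip t with _ | ⟨c, u⟩
  · simp
  · have hpre := rstrip_prefix t
    rw [hu] at hpre
    rcases hpre with ⟨w, hw⟩
    subst hw
    have hne : 0 < (c :: u ++ w).length := by simp
    have := h0 hne
    simp only [List.cons_append, List.getElem_cons_zero] at this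
    rw [List.dropWhile_cons]
    simp [this]

theorem strip_idem (cs : List Char) :
    PySem.Chars.strip (PySem.Chars.strip cs) = PySem.Chars.strip cs := by
  rw [PySem.Chars.strip, PySem.Chars.strip]
  rw [lstrip_of_lstrip_eq (t := PySem.Chars.lstrip cs)
    (by simp [PySem.Chars.lstrip, List.dropWhile_idempotent])]
  rw [PySem.Chars.rstrip, PySem.Chars.rstrip]
  simp [List.dropWhile_idempotent]

theorem mem_strip {c : Char} {cs : List Char} (h : c ∈ PySem.Chars.strip cs) : c ∈ cs := by
  rw [PySem.Chars.strip, PySem.Chars.rstrip, PySem.Chars.lstrip] at h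
  simp only [List.mem_reverse] at h
  have h1 := (List.dropWhile_suffix (p := PySem.Chars.isspace)).mem h
  simp only [List.mem_reverse] at h1
  exact (List.dropWhile_suffix (p := PySem.Chars.isspace)).mem h1

-- every line produced by splitlines.go is free of line-break characters
theorem splitlines_go_no_break (isB : Char → Bool) (n : Nat) :
    ∀ (s cur : List Char) (acc : List (List Char)), s.length ≤ n →
    (∀ c ∈ cur, isB c = false) →
    (∀ l ∈ acc, ∀ c ∈ l, isB c = false) →
    ∀ l ∈ PySem.Chars.splitlines.go isB s cur acc, ∀ c ∈ l, isB c = false := by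
  induction n with
  | zero =>
    intro s cur acc hlen hcur hacc l hl
    have hs : s = [] := List.eq_nil_of_length_eq_zero (Nat.le_zero.mp hlen)
    subst hs
    rw [PySem.Chars.splitlines.go] at hl
    split at hl
    · simp only [List.mem_reverse] at hl; exact hacc l hl
    · simp only [List.mem_reverse, List.mem_cons] at hl
      rcases hl with h | h
      · subst h; intro c hc; exact hcur c (List.mem_reverse.mp hc)
      · exact hacc l h
  | succ n ih =>
    intro s cur acc hlen hcur hacc l hl
    have hacc' : ∀ l ∈ cur.reverse :: acc, ∀ c ∈ l, isB c = false := by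
      intro l hl c hc
      rcases List.mem_cons.mp hl with h | h
      · subst h; exact hcur c (List.mem_reverse.mp hc)
      · exact hacc l h c hc
    rw [PySem.Chars.splitlines.go.eq_def] at hl
    split at hl
    · split at hl
      · simp only [List.mem_reverse] at hl; exact hacc l hl
      · simp only [List.mem_reverse, List.mem_cons] at hl
        rcases hl with h | h
        · subst h; intro c hc; exact hcur c (List.mem_reverse.mp hc)
        · exact hacc l h
    · rename_i _ _ _ rest
      have : rest.length ≤ n := by simp at hlen; omega
      exact ih rest [] _ this (by simp) hacc' l hl
    · rename_i _ _ c rest _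
      have hrl : rest.length ≤ n := by simp at hlen; omega
      split at hl
      · exact ih rest [] _ hrl (by simp) hacc' l hl
      · rename_i hBc
        refine ih rest (c :: cur) acc hrl ?_ hacc l hl
        intro c' hc'
        rcases List.mem_cons.mp hc' with h | h
        · subst h; simpa using hBc
        · exact hcur c' h

theorem splitlines_no_newline (cs : List Char) :
    ∀ l ∈ PySem.Chars.splitlines cs, '\n' ∉ l := by
  intro l hl hmem
  rw [PySem.Chars.splitlines] at hl
  have := splitlines_go_no_break _ cs.length cs [] [] le_rfl (by simp) (by simp) l hl '\n' hmem
  simp at this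

-- on a line without '\n', A's "cleaned" equals "stripped"
theorem cleaned_eq (line : String) (h : '\n' ∉ line.toList) :
    PySem.Str.strip (PySem.Str.replace (PySem.Str.strip line) "\n" " ") = PySem.Str.strip line := by
  have h2 : '\n' ∉ PySem.Chars.strip line.toList := fun hc => h (mem_strip hc)
  have hlist :
      (PySem.Str.strip (PySem.Str.replace (PySem.Str.strip line) "\n" " ")).toList
        = (PySem.Str.strip line).toList := by
    simp only [PySem.Str.toList_strip, PySem.Str.toList_replace]
    rw [show ("\n" : String).toList = ['\n'] from rfl, show (" " : String).toList = [' '] from rfl]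
    rw [replace_no_newline _ h2, strip_idem]
  exact String.toList_inj.mp hlist

-- the fused loop equals A's two scans
theorem bLoop_eq (lines : List String)
    (h : ∀ l ∈ lines, PySem.Str.strip (PySem.Str.replace (PySem.Str.strip l) "\n" " ") = PySem.Str.strip l) :
    ∀ fb, bLoop lines fb =
      match aLoop1 lines with
      | some r => r
      | none => (fb.or (aLoop2 lines)).getD "Test failed" := by
  induction lines with
  | nil => intro fb; simp [bLoop, aLoop1, aLoop2]
  | cons line rest ih =>
    intro fb
    have hline := h line List.mem_cons_self
    have IH := ih (fun l hl => h l (List.mem_cons_of_mem _ hl))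
    have kweq : bKeywords = aKeywords := rfl
    by_cases hk : ∃ x ∈ aKeywords, PySem.Chars.isIn x.toList (PySem.Chars.strip line.toList) = true
    · by_cases hlen : 5 < (PySem.Chars.strip line.toList).length
      · simp [bLoop, aLoop1, kweq, hline, hk, hlen]
      · simp only [bLoop, aLoop1, aLoop2]
        simp [kweq, hline, hk, hlen, IH]
        cases haL : aLoop1 rest with
        | some r => simp
        | none =>
          cases fb with
          | some v => simp
          | none =>
            by_cases hc : ¬PySem.Chars.strip line.toList = [] ∧
                PySem.Chars.startswith (PySem.Chars.strip line.toList) ['-', '-', '-'] = false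
            · simp [hc]
            · simp [hc]
    · simp only [bLoop, aLoop1, aLoop2]
      simp [kweq, hk, IH]
      cases haL : aLoop1 rest with
      | some r => simp
      | none =>
        cases fb with
        | some v => simp
        | none =>
          by_cases hc : ¬PySem.Chars.strip line.toList = [] ∧
              PySem.Chars.startswith (PySem.Chars.strip line.toList) ['-', '-', '-'] = false
          · simp [hc]
          · simp [hc]

-- ===== VERDICT (by name: the statement is the Claim_ definition above) =====
theorem extract_short_message_py_spec : Claim_equal_extract_short_message_py := by
  intro output _
  unfold Spec_extract_short_message_py extract_short_message_py extract_short_message_py_alt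
  split
  · rfl
  · rw [bLoop_eq _ ?_ none]
    · cases aLoop1 (PySem.Str.splitlines output) <;> simp
    · intro l hl
      apply cleaned_eq
      intro hmem
      have hbr : l.toList ∈ PySem.Chars.splitlines output.toList := by
        have := PySem.Str.splitlines_map_toList output
        rw [← this]
        exact List.mem_map_of_mem hl
      exact splitlines_no_newline output.toList l.toList hbr hmem
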